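-- pv_equiv track=rewrite | github.com/hyungEee/codingTest-python | brute force/3085.py | maxCandy
-- ===== SOURCE A (Python) =====
-- def maxCandy(candy,n):
--     rowMax,colMax=1,1
--     for i in range(n):
--         rowCnt=1
--         for j in range(n-1): #가로로 비교
--             if candy[i][j]==candy[i][j+1]:
--                 rowCnt+=1
--             else:
--                 rowCnt=1
--             rowMax=max(rowMax,rowCnt)
--     for i in range(n):
--         colCnt=1
--         for j in range(n-1): #세로로 비교
--             if candy[j][i]==candy[j+1][i]:
--                 colCnt+=1
--             else:
--                 colCnt=1
--             colMax=max(colMax,colCnt)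
--     return max(rowMax,colMax)
-- ===== SOURCE B (Python) =====
-- def maxCandy(candy, n):
--     # single fused traversal: per-column vertical run counters + per-row horizontal counter
--     best = 1
--     colCnt = [1] * max(n, 0)
--     for i in range(n):
--         rowCnt = 1
--         for j in range(n):
--             if j > 0:
--                 rowCnt = rowCnt + 1 if candy[i][j] == candy[i][j - 1] else 1
--                 best = max(best, rowCnt)
--             if i > 0:
--                 colCnt[j] = colCnt[j] + 1 if candy[i][j] == candy[i - 1][j] else 1
--                 best = max(best, colCnt[j])
--     return best
-- ===== Notes on version B (the rewrite author's own statement) =====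
-- stated objective: alternative
-- what changed: A makes two separate row-major/column-major O(n^2) passes (one for horizontal runs, one for vertical runs); B computes the answer in a single traversal of the grid, keeping one horizontal run counter per row and a persistent array of per-column vertical run counters, folding everything into one running maximum.
import Mathlib
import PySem

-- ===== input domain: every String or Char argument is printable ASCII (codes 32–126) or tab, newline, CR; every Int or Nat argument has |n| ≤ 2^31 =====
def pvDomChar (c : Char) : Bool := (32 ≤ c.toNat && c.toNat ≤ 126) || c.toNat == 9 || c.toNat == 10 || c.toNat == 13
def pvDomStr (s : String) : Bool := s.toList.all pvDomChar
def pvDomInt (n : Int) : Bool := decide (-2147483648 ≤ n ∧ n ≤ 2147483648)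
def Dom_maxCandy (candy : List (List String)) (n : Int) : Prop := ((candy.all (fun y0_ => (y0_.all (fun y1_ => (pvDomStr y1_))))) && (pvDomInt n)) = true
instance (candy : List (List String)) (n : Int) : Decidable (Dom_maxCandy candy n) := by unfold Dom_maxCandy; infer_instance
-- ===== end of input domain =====

-- B fuses A's two quadratic passes into one traversal of the grid (same O(n^2) cost, one pass
-- instead of two), keeping a per-column array of vertical run lengths; return values proved equal.

-- ===== PORT A =====
-- shared cell accessor: candy[i][j] (total form of the Python indexing; exact under Pre_)
def pvGet (candy : List (List String)) (i j : Int) : String :=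
  PySem.List.pyGetD (PySem.List.pyGetD candy i []) j ""

-- inner body of A's row pass: state (rowMax, rowCnt), 'if candy[i][j]==candy[i][j+1]: …'
def stepRowA (candy : List (List String)) (i : Int) (p : Int × Int) (j : Int) : Int × Int :=
  let rc : Int := if pvGet candy i j = pvGet candy i (j + 1) then p.2 + 1 else 1
  (max p.1 rc, rc)

-- inner body of A's column pass: state (colMax, colCnt), 'if candy[j][i]==candy[j+1][i]: …'
def stepColA (candy : List (List String)) (i : Int) (p : Int × Int) (j : Int) : Int × Int :=
  let cc : Int := if pvGet candy j i = pvGet candy (j + 1) i then p.2 + 1 else 1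
  (max p.1 cc, cc)

def maxCandy (candy : List (List String)) (n : Int) : Int :=
  let rowMax :=
    (PySem.List.pyRange 0 n 1).foldl
      (fun rm i => ((PySem.List.pyRange 0 (n - 1) 1).foldl (stepRowA candy i) (rm, 1)).1) 1
  let colMax :=
    (PySem.List.pyRange 0 n 1).foldl
      (fun cm i => ((PySem.List.pyRange 0 (n - 1) 1).foldl (stepColA candy i) (cm, 1)).1) 1
  max rowMax colMax

-- ===== PORT B =====
-- body of B's fused inner loop at cell (i, j): state (best, rowCnt, colCnt)
def stepCellB (candy : List (List String)) (i : Int) (s : Int × Int × List Int) (j : Int) :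
    Int × Int × List Int :=
  let s1 : Int × Int :=
    if 0 < j then
      let rc : Int := if pvGet candy i j = pvGet candy i (j - 1) then s.2.1 + 1 else 1
      (max s.1 rc, rc)
    else (s.1, s.2.1)
  if 0 < i then
    let cc : Int := if pvGet candy i j = pvGet candy (i - 1) j then PySem.List.pyGetD s.2.2 j 1 + 1 else 1
    (max s1.1 cc, s1.2, PySem.List.pySetD s.2.2 j cc)
  else (s1.1, s1.2, s.2.2)

def maxCandy_alt (candy : List (List String)) (n : Int) : Int :=
  let init : Int × List Int := (1, List.replicate (max n 0).toNat (1 : Int))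
  let fin :=
    (PySem.List.pyRange 0 n 1).foldl
      (fun (st : Int × List Int) i =>
        let inner := (PySem.List.pyRange 0 n 1).foldl (stepCellB candy i) (st.1, 1, st.2)
        (inner.1, inner.2.2)) init
  fin.1

-- ===== PRECONDITION & SPEC =====
-- Pre_ excludes exactly the inputs where Python A raises IndexError: for n ≥ 2 every cell
-- candy[i][j] with i,j < n is read, so the first n rows must exist and have length ≥ n.
def Pre_maxCandy (candy : List (List String)) (n : Int) : Prop :=
  n ≤ 1 ∨ (n ≤ (candy.length : Int) ∧ ∀ row ∈ candy.take n.toNat, n ≤ (row.length : Int))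
instance (candy : List (List String)) (n : Int) : Decidable (Pre_maxCandy candy n) := by
  unfold Pre_maxCandy; infer_instance
def pvWitness_maxCandy : List (List String) × Int := ([["a", "b"], ["b", "b"]], 2)

def Spec_maxCandy (candy : List (List String)) (n : Int) (out : Int) : Prop := out = maxCandy_alt candy n
instance (candy : List (List String)) (n : Int) (out : Int) : Decidable (Spec_maxCandy candy n out) := by unfold Spec_maxCandy; infer_instance

-- ===== CLAIM (what is proved, stated in full; the proofs are below) =====
def Claim_equal_maxCandy : Prop := ∀ (candy : List (List String)) (n : Int), Dom_maxCandy candy n → Pre_maxCandy candy n → Spec_maxCandy candy n (maxCandy candy n)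

-- ===== LEMMAS AND PROOFS =====

-- horizontal run length ending at cell (i, j) (value ≥ 1; hgrp _ i 0 = 1)
def hgrp (candy : List (List String)) (i : Int) : Nat → Int
  | 0 => 1
  | j + 1 => if pvGet candy i (j : Int) = pvGet candy i ((j : Int) + 1) then hgrp candy i j + 1 else 1

-- vertical run length in column c ending at row r
def vgrp (candy : List (List String)) (c : Int) : Nat → Int
  | 0 => 1
  | r + 1 => if pvGet candy (r : Int) c = pvGet candy ((r : Int) + 1) c then vgrp candy c r + 1 else 1

-- the values B inspects at cell (i, j)
def cellVals (candy : List (List String)) (i j : Nat) : List Int :=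
  (if 0 < j then [hgrp candy (i : Int) j] else []) ++ (if 0 < i then [vgrp candy (j : Int) i] else [])

theorem pyRange_zero_toNat (a : Int) :
    PySem.List.pyRange 0 a 1 = PySem.List.pyRange 0 ((a.toNat : Int)) 1 := by
  by_cases h : 0 ≤ a
  · congr 1; omega
  · rw [PySem.List.pyRange_one_eq_nil (by omega), PySem.List.pyRange_one_eq_nil (by omega)]

theorem foldl_max_shift (l : List Int) : ∀ (a b : Int),
    l.foldl max (max a b) = max a (l.foldl max b) := by
  induction l with
  | nil => intro a b; rfl
  | cons c t ih =>
    intro a b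
    simp only [List.foldl_cons, max_assoc]
    exact ih a (max b c)

theorem foldl_max_perm {l₁ l₂ : List Int} (p : l₁.Perm l₂) : ∀ (a : Int),
    l₁.foldl max a = l₂.foldl max a := by
  induction p with
  | nil => intro a; rfl
  | cons x _ ih => intro a; simp only [List.foldl_cons, ih]
  | swap x y l => intro a; simp only [List.foldl_cons, max_right_comm]
  | trans _ _ ih1 ih2 => intro a; rw [ih1, ih2]

theorem foldl_max_append (l₁ l₂ : List Int) :
    (l₁ ++ l₂).foldl max 1 = max (l₁.foldl max 1) (l₂.foldl max 1) := by
  rw [List.foldl_append]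
  have h1 : (1 : Int) ≤ l₁.foldl max 1 := (PySem.List.le_foldl_max l₁ 1).1
  calc l₂.foldl max (l₁.foldl max 1) = l₂.foldl max (max (l₁.foldl max 1) 1) := by
        rw [max_eq_left h1]
    _ = max (l₁.foldl max 1) (l₂.foldl max 1) := foldl_max_shift l₂ _ 1

theorem lem_rowInner (candy : List (List String)) (i : Int) : ∀ (m : Nat) (b : Int),
    (PySem.List.pyRange 0 (m : Int) 1).foldl (stepRowA candy i) (b, 1)
      = (((List.range m).map (fun j => hgrp candy i (j + 1))).foldl max b, hgrp candy i m) := by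
  intro m
  induction m with
  | zero =>
    intro b
    rw [PySem.List.pyRange_one_eq_nil (a := (0 : Int)) (b := ((0 : Nat) : Int)) (by simp)]
    simp [hgrp]
  | succ m ih =>
    intro b
    have hr : PySem.List.pyRange 0 ((m + 1 : Nat) : Int) 1
        = PySem.List.pyRange 0 (m : Int) 1 ++ [(m : Int)] := by
      have := PySem.List.pyRange_one_succ_right (a := 0) (b := (m : Int)) (by omega)
      rw [show ((m + 1 : Nat) : Int) = (m : Int) + 1 by push_cast; ring]
      exact this
    rw [hr, List.foldl_append, ih b, List.range_succ, List.map_append, List.foldl_append]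
    simp [stepRowA, hgrp]

theorem lem_colInner (candy : List (List String)) (i : Int) : ∀ (m : Nat) (b : Int),
    (PySem.List.pyRange 0 (m : Int) 1).foldl (stepColA candy i) (b, 1)
      = (((List.range m).map (fun j => vgrp candy i (j + 1))).foldl max b, vgrp candy i m) := by
  intro m
  induction m with
  | zero =>
    intro b
    rw [PySem.List.pyRange_one_eq_nil (a := (0 : Int)) (b := ((0 : Nat) : Int)) (by simp)]
    simp [vgrp]
  | succ m ih =>
    intro b
    have hr : PySem.List.pyRange 0 ((m + 1 : Nat) : Int) 1
        = PySem.List.pyRange 0 (m : Int) 1 ++ [(m : Int)] := by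
      have := PySem.List.pyRange_one_succ_right (a := 0) (b := (m : Int)) (by omega)
      rw [show ((m + 1 : Nat) : Int) = (m : Int) + 1 by push_cast; ring]
      exact this
    rw [hr, List.foldl_append, ih b, List.range_succ, List.map_append, List.foldl_append]
    simp [stepColA, vgrp]

theorem lem_rowOuter (candy : List (List String)) (M : Nat) : ∀ (N : Nat) (b : Int),
    (PySem.List.pyRange 0 (N : Int) 1).foldl
        (fun rm i => ((PySem.List.pyRange 0 (M : Int) 1).foldl (stepRowA candy i) (rm, 1)).1) b
      = ((List.range N).flatMap (fun (i : Nat) => (List.range M).map (fun j => hgrp candy (i : Int) (j + 1)))).foldl max b := by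
  intro N
  induction N with
  | zero =>
    intro b
    rw [PySem.List.pyRange_one_eq_nil (a := (0 : Int)) (b := ((0 : Nat) : Int)) (by simp)]
    simp
  | succ N ih =>
    intro b
    have hr : PySem.List.pyRange 0 ((N + 1 : Nat) : Int) 1
        = PySem.List.pyRange 0 (N : Int) 1 ++ [(N : Int)] := by
      have := PySem.List.pyRange_one_succ_right (a := 0) (b := (N : Int)) (by omega)
      rw [show ((N + 1 : Nat) : Int) = (N : Int) + 1 by push_cast; ring]
      exact this
    rw [hr, List.foldl_append, ih b, List.range_succ, List.flatMap_append, List.foldl_append]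
    simp only [List.foldl_cons, List.flatMap_cons, List.flatMap_nil, List.append_nil]
    rw [lem_rowInner]
    rfl

theorem lem_colOuter (candy : List (List String)) (M : Nat) : ∀ (N : Nat) (b : Int),
    (PySem.List.pyRange 0 (N : Int) 1).foldl
        (fun cm i => ((PySem.List.pyRange 0 (M : Int) 1).foldl (stepColA candy i) (cm, 1)).1) b
      = ((List.range N).flatMap (fun (i : Nat) => (List.range M).map (fun j => vgrp candy (i : Int) (j + 1)))).foldl max b := by
  intro N
  induction N with
  | zero =>
    intro b
    rw [PySem.List.pyRange_one_eq_nil (a := (0 : Int)) (b := ((0 : Nat) : Int)) (by simp)]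
    simp
  | succ N ih =>
    intro b
    have hr : PySem.List.pyRange 0 ((N + 1 : Nat) : Int) 1
        = PySem.List.pyRange 0 (N : Int) 1 ++ [(N : Int)] := by
      have := PySem.List.pyRange_one_succ_right (a := 0) (b := (N : Int)) (by omega)
      rw [show ((N + 1 : Nat) : Int) = (N : Int) + 1 by push_cast; ring]
      exact this
    rw [hr, List.foldl_append, ih b, List.range_succ, List.flatMap_append, List.foldl_append]
    simp only [List.foldl_cons, List.flatMap_cons, List.flatMap_nil, List.append_nil]
    rw [lem_colInner]
    rfl

theorem set_map_range {α : Type} (N k : Nat) (g : Nat → α) (v : α) :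
    ((List.range N).map g).set k v = (List.range N).map (fun j => if j = k then v else g j) := by
  apply List.ext_getElem
  · simp
  · intro idx h1 h2
    simp only [List.getElem_set, List.getElem_map, List.getElem_range]
    rcases eq_or_ne idx k with h | h
    · simp [h]
    · simp [h, Ne.symm h]


theorem hgrp_pred (candy : List (List String)) (i : Int) (k : Nat) (hk : 0 < k) :
    (if pvGet candy i (k : Int) = pvGet candy i ((k : Int) - 1) then hgrp candy i (k - 1) + 1 else 1)
      = hgrp candy i k := by
  obtain ⟨k', rfl⟩ : ∃ k', k = k' + 1 := ⟨k - 1, by omega⟩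
  have hc : (((k' + 1 : Nat) : Int)) - 1 = (k' : Int) := by push_cast; ring
  have hc2 : ((k' + 1 : Nat) : Int) = (k' : Int) + 1 := by push_cast; ring
  rw [hgrp, Nat.add_sub_cancel, hc, hc2]
  by_cases h : pvGet candy i (k' : Int) = pvGet candy i ((k' : Int) + 1) <;>
    simp [h, eq_comm]

theorem vgrp_pred (candy : List (List String)) (c : Int) (i : Nat) (hi : 0 < i) :
    (if pvGet candy (i : Int) c = pvGet candy ((i : Int) - 1) c then vgrp candy c (i - 1) + 1 else 1)
      = vgrp candy c i := by
  obtain ⟨i', rfl⟩ : ∃ i', i = i' + 1 := ⟨i - 1, by omega⟩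
  have hc : (((i' + 1 : Nat) : Int)) - 1 = (i' : Int) := by push_cast; ring
  have hc2 : ((i' + 1 : Nat) : Int) = (i' : Int) + 1 := by push_cast; ring
  rw [vgrp, Nat.add_sub_cancel, hc, hc2]
  by_cases h : pvGet candy (i' : Int) c = pvGet candy ((i' : Int) + 1) c <;>
    simp [h, eq_comm]

theorem getD_map_range' {α : Type} (N k : Nat) (g : Nat → α) (d : α) (hk : k < N) :
    ((List.range N).map g).getD k d = g k := by
  rw [List.getD_eq_getElem?_getD]
  simp [hk]

theorem lem_innerB (candy : List (List String)) (i N : Nat) : ∀ (k : Nat), k ≤ N → ∀ (b : Int),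
    (PySem.List.pyRange 0 (k : Int) 1).foldl (stepCellB candy (i : Int))
        (b, 1, (List.range N).map (fun (j : Nat) => vgrp candy (j : Int) (i - 1)))
      = (((List.range k).flatMap (fun j => cellVals candy i j)).foldl max b,
         hgrp candy (i : Int) (k - 1),
         (List.range N).map (fun (j : Nat) => if j < k then vgrp candy (j : Int) i else vgrp candy (j : Int) (i - 1))) := by
  intro k
  induction k with
  | zero =>
    intro _ b
    rw [PySem.List.pyRange_one_eq_nil (a := (0 : Int)) (b := ((0 : Nat) : Int)) (by simp)]
    simp [hgrp]
  | succ k ih =>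
    intro hk1 b
    have hkN : k < N := by omega
    have hr : PySem.List.pyRange 0 ((k + 1 : Nat) : Int) 1
        = PySem.List.pyRange 0 (k : Int) 1 ++ [(k : Int)] := by
      have := PySem.List.pyRange_one_succ_right (a := 0) (b := (k : Int)) (by omega)
      rw [show ((k + 1 : Nat) : Int) = (k : Int) + 1 by push_cast; ring]
      exact this
    rw [hr, List.foldl_append, ih (by omega) b]
    simp only [List.foldl_cons, List.foldl_nil]
    rw [List.range_succ, List.flatMap_append, List.foldl_append]
    simp only [List.flatMap_cons, List.flatMap_nil, List.append_nil]
    simp only [stepCellB, Int.natCast_pos, PySem.List.pyGetD_natCast, PySem.List.pySetD_natCast]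
    rw [getD_map_range' N k _ 1 hkN]
    simp only [lt_irrefl, if_false]
    rw [set_map_range]
    by_cases hk0 : 0 < k <;> by_cases hi0 : 0 < i <;>
      simp only [hk0, hi0, if_true, if_false, cellVals, hgrp_pred candy (i : Int) k,
        vgrp_pred candy (k : Int) i] <;>
      refine Prod.ext ?_ (Prod.ext ?_ ?_)
    all_goals first
      | rfl
      | (have hz : k = 0 := by omega
         subst hz
         rfl)
      | (apply List.map_congr_left
         intro j hj
         by_cases hji : j = k
         · subst hji
           first
             | (simp; done)
             | (have hz : i = 0 := by omega
                subst hz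
                simp)
         · by_cases hlt : j < k
           · simp [hji, hlt, show j < k + 1 by omega]
           · simp [hji, hlt, show ¬ j < k + 1 by omega])


theorem lem_outerB (candy : List (List String)) (N : Nat) : ∀ (I : Nat), I ≤ N →
    (PySem.List.pyRange 0 (I : Int) 1).foldl
        (fun (st : Int × List Int) i =>
          let inner := (PySem.List.pyRange 0 (N : Int) 1).foldl (stepCellB candy i) (st.1, 1, st.2)
          (inner.1, inner.2.2))
        (1, (List.range N).map (fun _ => (1 : Int)))
      = (((List.range I).flatMap (fun i => (List.range N).flatMap (fun j => cellVals candy i j))).foldl max 1,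
         (List.range N).map (fun (j : Nat) => vgrp candy (j : Int) (I - 1))) := by
  intro I
  induction I with
  | zero =>
    intro _
    rw [PySem.List.pyRange_one_eq_nil (a := (0 : Int)) (b := ((0 : Nat) : Int)) (by simp)]
    simp [vgrp]
  | succ I ih =>
    intro hI1
    have hr : PySem.List.pyRange 0 ((I + 1 : Nat) : Int) 1
        = PySem.List.pyRange 0 (I : Int) 1 ++ [(I : Int)] := by
      have := PySem.List.pyRange_one_succ_right (a := 0) (b := (I : Int)) (by omega)
      rw [show ((I + 1 : Nat) : Int) = (I : Int) + 1 by push_cast; ring]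
      exact this
    rw [hr, List.foldl_append, ih (by omega)]
    simp only [List.foldl_cons, List.foldl_nil]
    rw [lem_innerB candy I N N (le_refl N)]
    rw [List.range_succ, List.flatMap_append, List.foldl_append]
    simp only [List.flatMap_cons, List.flatMap_nil, List.append_nil, Nat.add_sub_cancel]
    refine Prod.ext rfl ?_
    show List.map _ _ = List.map _ _
    apply List.map_congr_left
    intro j hj
    simp [List.mem_range.mp hj]

theorem perm_transpose {α : Type} (F : Nat → Nat → α) : ∀ (a b : Nat),
    ((List.range a).flatMap (fun i => (List.range b).map (fun j => F i j))).Perm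
      ((List.range b).flatMap (fun j => (List.range a).map (fun i => F i j))) := by
  intro a b
  induction a with
  | zero => simp
  | succ a ih =>
    rw [List.range_succ, List.flatMap_append]
    simp only [List.flatMap_cons, List.flatMap_nil, List.append_nil]
    refine List.Perm.trans (ih.append_right _) ?_
    have h5 := List.flatMap_append_perm (List.range b)
      (fun j => (List.range a).map (fun i => F i j)) (fun j => [F a j])
    rw [← List.map_eq_flatMap] at h5
    refine List.Perm.trans h5 ?_
    apply List.Perm.of_eq
    simp only [List.map_append, List.map_cons, List.map_nil]

theorem perm_cells (candy : List (List String)) (N M : Nat) (hNM : N = M + 1) :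
    (((List.range N).flatMap (fun i => (List.range N).flatMap (fun j => cellVals candy i j)))).Perm
      (((List.range N).flatMap (fun (i : Nat) => (List.range M).map (fun j => hgrp candy (i : Int) (j + 1))))
        ++ ((List.range N).flatMap (fun (i : Nat) => (List.range M).map (fun j => vgrp candy (i : Int) (j + 1))))) := by
  subst hNM
  refine List.Perm.trans
    (List.Perm.flatMap_left _ (fun i _ => (List.flatMap_append_perm _ _ _).symm)) ?_
  refine List.Perm.trans (List.flatMap_append_perm _ _ _).symm ?_
  refine List.Perm.append ?_ ?_
  · apply List.Perm.of_eq
    refine congrArg (fun f => List.flatMap f (List.range (M + 1))) (funext fun i => ?_)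
    rw [List.range_succ_eq_map, List.flatMap_cons, List.flatMap_map]
    simp only [lt_irrefl, if_false, List.nil_append, Nat.succ_eq_add_one,
      Nat.succ_pos, if_true, ← List.map_eq_flatMap]
  · have e : ((List.range (M + 1)).flatMap (fun i =>
          (List.range (M + 1)).flatMap (fun (j : Nat) => if 0 < i then [vgrp candy (j : Int) i] else [])))
        = (List.range M).flatMap (fun (i : Nat) =>
            (List.range (M + 1)).map (fun (j : Nat) => vgrp candy (j : Int) (i + 1))) := by
      rw [List.range_succ_eq_map, List.flatMap_cons, List.flatMap_map]
      simp only [lt_irrefl, if_false, Nat.succ_eq_add_one, Nat.succ_pos, if_true,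
        ← List.map_eq_flatMap]
      simp
    rw [e]
    exact perm_transpose (fun i j => vgrp candy (j : Int) (i + 1)) M (M + 1)

-- ===== VERDICT (by name: the statement is the Claim_ definition above) =====
theorem maxCandy_spec : Claim_equal_maxCandy := by
  intro candy n _ _
  show maxCandy candy n = maxCandy_alt candy n
  by_cases hn : n ≤ 0
  · simp [maxCandy, maxCandy_alt,
      PySem.List.pyRange_one_eq_nil (a := (0 : Int)) (b := n) (by omega)]
  · have hN1 : 1 ≤ n.toNat := by omega
    have hNM : n.toNat = (n - 1).toNat + 1 := by omega
    have h1 : PySem.List.pyRange 0 n 1 = PySem.List.pyRange 0 ((n.toNat : Nat) : Int) 1 :=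
      pyRange_zero_toNat n
    have h2 : PySem.List.pyRange 0 (n - 1) 1
        = PySem.List.pyRange 0 (((n - 1).toNat : Nat) : Int) 1 := pyRange_zero_toNat (n - 1)
    have h3 : List.replicate (max n 0).toNat (1 : Int)
        = (List.range n.toNat).map (fun _ => (1 : Int)) := by
      rw [List.map_const', List.length_range]
      congr 1
      omega
    rw [maxCandy, maxCandy_alt, h1, h2, h3]
    rw [lem_rowOuter candy (n - 1).toNat n.toNat 1, lem_colOuter candy (n - 1).toNat n.toNat 1]
    rw [lem_outerB candy n.toNat n.toNat (le_refl _)]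
    rw [← foldl_max_append]
    exact (foldl_max_perm (perm_cells candy n.toNat (n - 1).toNat hNM) 1).symm
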